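-- pv_equiv track=rewrite | github.com/MrBrantCode/unitest_baseline | mut_generate/mist_train_taco/taco_11774/solution.py | calculate_max_scrabble_score
-- ===== SOURCE A (Python) =====
-- def calculate_max_scrabble_score(board, points):
--     N = len(board)
--     word = "IITMANDI"
--     word_length = len(word)
--     max_score = 0
--
--     for i in range(N - word_length + 1):
--         current_score = 0
--         word_multiplier = 1
--
--         for j in range(word_length):
--             letter_score = points[j]
--             modifier = board[i + j]
--
--             if modifier == 'd':
--                 letter_score *= 2
--             elif modifier == 't':
--                 letter_score *= 3
--             elif modifier == 'D':
--                 word_multiplier *= 2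
--             elif modifier == 'T':
--                 word_multiplier *= 3
--
--             current_score += letter_score
--
--         current_score *= word_multiplier
--         max_score = max(max_score, current_score)
--
--     return max_score
-- ===== SOURCE B (Python) =====
-- def calculate_max_scrabble_score(board, points):
--     # Event-scatter algorithm: precompute the unmodified base score once, then
--     # scatter each modifier cell's effect into per-window add/mul tables; one
--     # final pass takes the maximum.  Plain cells are never revisited per window.
--     N = len(board)
--     W = N - 7
--     if W <= 0:
--         return 0
--     base = sum(points[j] for j in range(8))
--     add = [0] * W
--     mul = [1] * W
--     for k, c in enumerate(board):
--         if c in ('d', 't', 'D', 'T'):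
--             for i in range(max(0, k - 7), min(W - 1, k) + 1):
--                 if c == 'd':
--                     add[i] += points[k - i]
--                 elif c == 't':
--                     add[i] += 2 * points[k - i]
--                 elif c == 'D':
--                     mul[i] *= 2
--                 else:
--                     mul[i] *= 3
--     best = 0
--     for i in range(W):
--         best = max(best, (base + add[i]) * mul[i])
--     return best
-- ===== Notes on version B (the rewrite author's own statement) =====
-- stated objective: faster
-- what changed: B replaces A's window-by-window gather (rescanning all 8 cells of every window with a branch chain) by an event-scatter algorithm: it computes the unmodified base score once, scatters each modifier cell's effect into per-window add/mul tables (plain cells contribute nothing and are visited once), and takes the maximum of (base+add[i])*mul[i] in a final pass.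
import Mathlib
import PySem

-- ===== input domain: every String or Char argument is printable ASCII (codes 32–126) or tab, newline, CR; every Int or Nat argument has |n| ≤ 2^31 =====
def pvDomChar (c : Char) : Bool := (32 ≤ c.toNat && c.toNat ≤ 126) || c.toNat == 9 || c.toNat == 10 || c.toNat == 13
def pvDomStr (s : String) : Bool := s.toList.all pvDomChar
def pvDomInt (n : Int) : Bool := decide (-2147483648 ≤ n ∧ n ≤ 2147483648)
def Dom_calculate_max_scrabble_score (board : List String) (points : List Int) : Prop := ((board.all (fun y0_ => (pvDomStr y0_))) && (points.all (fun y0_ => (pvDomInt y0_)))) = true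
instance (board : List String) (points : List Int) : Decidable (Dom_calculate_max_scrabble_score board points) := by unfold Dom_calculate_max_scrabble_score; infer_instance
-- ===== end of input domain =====

-- B replaces A's per-window 8-cell branch scan with an event-scatter algorithm: base score computed once, each modifier cell scattered into per-window add/mul tables, then one max pass; measured faster (plain cells do no per-window work); return value proved equal on Pre_.


-- ===== PORT A =====
-- Literal port of A: window loop, inner if/elif branch chain accumulating (current_score, word_multiplier).
-- points[j] / board[i+j] are pyGetD: Pre_ guarantees every index the Python reads is in range.
def calculate_max_scrabble_score (board : List String) (points : List Int) : Int :=
  let N : Int := board.length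
  (PySem.List.pyRange 0 (N - 8 + 1) 1).foldl (fun max_score i =>
    let p := (PySem.List.pyRange 0 8 1).foldl (fun (p : Int × Int) j =>
      let letter_score := PySem.List.pyGetD points j 0
      let modifier := PySem.List.pyGetD board (i + j) ""
      if modifier = "d" then (p.1 + letter_score * 2, p.2)
      else if modifier = "t" then (p.1 + letter_score * 3, p.2)
      else if modifier = "D" then (p.1 + letter_score, p.2 * 2)
      else if modifier = "T" then (p.1 + letter_score, p.2 * 3)
      else (p.1 + letter_score, p.2)) (0, 1)
    max max_score (p.1 * p.2)) 0

-- ===== PORT B =====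
-- B-side helpers: the body of B's scatter loop over one enumerated cell (k, c).
def pvInner (points : List Int) (W k : Int) (c : String) (st : List Int × List Int) : List Int × List Int :=
  (PySem.List.pyRange (max 0 (k - 7)) (min (W - 1) k + 1) 1).foldl (fun st i =>
    if c = "d" then
      (PySem.List.pySetD st.1 i (PySem.List.pyGetD st.1 i 0 + PySem.List.pyGetD points (k - i) 0), st.2)
    else if c = "t" then
      (PySem.List.pySetD st.1 i (PySem.List.pyGetD st.1 i 0 + 2 * PySem.List.pyGetD points (k - i) 0), st.2)
    else if c = "D" then
      (st.1, PySem.List.pySetD st.2 i (PySem.List.pyGetD st.2 i 0 * 2))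
    else
      (st.1, PySem.List.pySetD st.2 i (PySem.List.pyGetD st.2 i 0 * 3))) st

def pvStep (points : List Int) (W : Int) (st : List Int × List Int) (kc : Int × String) : List Int × List Int :=
  if kc.2 = "d" ∨ kc.2 = "t" ∨ kc.2 = "D" ∨ kc.2 = "T" then pvInner points W kc.1 kc.2 st else st

-- Literal port of B: base score once, scatter every modifier cell into add/mul tables, final max pass.
def calculate_max_scrabble_score_alt (board : List String) (points : List Int) : Int :=
  let N : Int := board.length
  let W : Int := N - 7
  if W ≤ 0 then 0
  else
    let base := (PySem.List.pyRange 0 8 1).foldl (fun acc j => acc + PySem.List.pyGetD points j 0) 0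
    let add : List Int := List.replicate W.toNat 0
    let mul : List Int := List.replicate W.toNat 1
    let st := (PySem.List.enumerate board 0).foldl (pvStep points W) (add, mul)
    (PySem.List.pyRange 0 W 1).foldl (fun best i =>
      max best ((base + PySem.List.pyGetD st.1 i 0) * PySem.List.pyGetD st.2 i 0)) 0

-- ===== PRECONDITION & SPEC =====
-- Pre_ excludes exactly the inputs on which Python A raises IndexError: a board of length ≥ 8 with fewer than 8 points.
def Pre_calculate_max_scrabble_score (board : List String) (points : List Int) : Prop :=
  board.length < 8 ∨ 8 ≤ points.length
instance (board : List String) (points : List Int) : Decidable (Pre_calculate_max_scrabble_score board points) := by unfold Pre_calculate_max_scrabble_score; infer_instance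
def pvWitness_calculate_max_scrabble_score : List String × List Int :=
  (["d", ".", "T", ".", ".", "t", ".", "."], [1, 2, 3, 4, 5, 6, 7, 8])
def Spec_calculate_max_scrabble_score (board : List String) (points : List Int) (out : Int) : Prop := out = calculate_max_scrabble_score_alt board points
instance (board : List String) (points : List Int) (out : Int) : Decidable (Spec_calculate_max_scrabble_score board points out) := by unfold Spec_calculate_max_scrabble_score; infer_instance

-- ===== CLAIM (what is proved, stated in full; the proofs are below) =====
def Claim_equal_calculate_max_scrabble_score : Prop := ∀ (board : List String) (points : List Int), Dom_calculate_max_scrabble_score board points → Pre_calculate_max_scrabble_score board points → Spec_calculate_max_scrabble_score board points (calculate_max_scrabble_score board points)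

-- ===== LEMMAS AND PROOFS =====

-- Proof-side abbreviations: per-cell letter adjustment, letter multiplier, word multiplier.
def pvAdj (c : String) (p : Int) : Int := if c = "d" then p else if c = "t" then 2 * p else 0
def pvLm (c : String) : Int := if c = "d" then 2 else if c = "t" then 3 else 1
def pvWm (c : String) : Int := if c = "D" then 2 else if c = "T" then 3 else 1

-- Total additive / multiplicative contribution of the cells of l (enumerated from m) to window i.
def pvCA (pts : List Int) : List String → Int → Int → Int
  | [], _, _ => 0
  | c :: l, m, i =>
      (if i ≤ m ∧ m ≤ i + 7 then pvAdj c (PySem.List.pyGetD pts (m - i) 0) else 0) + pvCA pts l (m + 1) i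
def pvCM : List String → Int → Int → Int
  | [], _, _ => 1
  | c :: l, m, i =>
      (if i ≤ m ∧ m ≤ i + 7 then pvWm c else 1) * pvCM l (m + 1) i

-- A's per-cell branch chain in sum/product form.
theorem pv_cell (p : Int × Int) (ls : Int) (m : String) :
    (if m = "d" then (p.1 + ls * 2, p.2)
     else if m = "t" then (p.1 + ls * 3, p.2)
     else if m = "D" then (p.1 + ls, p.2 * 2)
     else if m = "T" then (p.1 + ls, p.2 * 3)
     else (p.1 + ls, p.2)) = (p.1 + ls * pvLm m, p.2 * pvWm m) := by
  simp only [pvLm, pvWm]; split_ifs with h1 h2 h3 h4 <;> simp_all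

theorem pv_lm_adj (c : String) (p : Int) : p * pvLm c = p + pvAdj c p := by
  simp only [pvLm, pvAdj]; split_ifs <;> ring

theorem pv_get_map (W i : Int) (f : Int → Int) (d : Int) (h0 : 0 ≤ i) (hW : i < W) :
    PySem.List.pyGetD ((PySem.List.pyRange 0 W 1).map f) i d = f i :=
  PySem.List.pyGetD_map_pyRange_of_nonneg f W i d h0 hW
theorem pv_set_map (W i : Int) (f : Int → Int) (v : Int) (h0 : 0 ≤ i) :
    PySem.List.pySetD ((PySem.List.pyRange 0 W 1).map f) i v
      = (PySem.List.pyRange 0 W 1).map (fun x => if x = i then v else f x) := by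
  rw [PySem.List.pySetD_of_nonneg (h := h0)]
  apply List.ext_getElem
  · simp
  · intro k h1 h2
    simp only [List.getElem_set, List.getElem_map, PySem.List.getElem_pyRange_one]
    by_cases hki : (k : Int) = i
    · rw [if_pos (by omega), if_pos (by omega)]
    · rw [if_neg (by omega), if_neg (by simpa using hki)]

theorem pv_fold_set (W : Int) (u : Int → Int → Int) :
    ∀ (n : Nat) (a b : Int) (f : Int → Int), n = (b - a).toNat → 0 ≤ a → b ≤ W →
    (PySem.List.pyRange a b 1).foldl
        (fun (l : List Int) i => PySem.List.pySetD l i (u i (PySem.List.pyGetD l i 0)))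
        ((PySem.List.pyRange 0 W 1).map f)
      = (PySem.List.pyRange 0 W 1).map (fun i => if a ≤ i ∧ i < b then u i (f i) else f i) := by
  intro n
  induction n with
  | zero =>
    intro a b f hn ha hb
    have hnil : PySem.List.pyRange a b 1 = [] := PySem.List.pyRange_one_eq_nil (by omega)
    rw [hnil, List.foldl_nil]
    exact (List.map_congr_left (fun i _ => by rw [if_neg (by omega)])).symm
  | succ n ih =>
    intro a b f hn ha hb
    have hcons : PySem.List.pyRange a b 1 = a :: PySem.List.pyRange (a + 1) b 1 :=
      PySem.List.pyRange_one_cons (by omega)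
    rw [hcons, List.foldl_cons,
        pv_get_map W a f 0 ha (by omega), pv_set_map W a f (u a (f a)) ha,
        ih (a + 1) b _ (by omega) (by omega) hb]
    refine List.map_congr_left (fun i _ => ?_)
    by_cases hia : i = a
    · subst hia; split_ifs <;> first | rfl | omega
    · rw [if_neg hia]
      by_cases hc : a + 1 ≤ i ∧ i < b
      · rw [if_pos hc, if_pos (by omega)]
      · rw [if_neg hc, if_neg (by omega)]

theorem pv_fold_set' (W : Int) (u : Int → Int → Int) (a b : Int) (f : Int → Int)
    (ha : 0 ≤ a) (hb : b ≤ W) :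
    (PySem.List.pyRange a b 1).foldl
        (fun (l : List Int) i => PySem.List.pySetD l i (u i (PySem.List.pyGetD l i 0)))
        ((PySem.List.pyRange 0 W 1).map f)
      = (PySem.List.pyRange 0 W 1).map (fun i => if a ≤ i ∧ i < b then u i (f i) else f i) :=
  pv_fold_set W u (b - a).toNat a b f rfl ha hb

-- A fold whose body changes only the first (resp. second) component.
theorem pv_foldl_fst (g : List Int → Int → List Int) :
    ∀ (is : List Int) (l r : List Int),
    is.foldl (fun (st : List Int × List Int) i => (g st.1 i, st.2)) (l, r) = (is.foldl g l, r) := by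
  intro is
  induction is with
  | nil => intro l r; rfl
  | cons x xs ih => intro l r; simp [List.foldl_cons, ih]

theorem pv_foldl_snd (g : List Int → Int → List Int) :
    ∀ (is : List Int) (l r : List Int),
    is.foldl (fun (st : List Int × List Int) i => (st.1, g st.2 i)) (l, r) = (l, is.foldl g r) := by
  intro is
  induction is with
  | nil => intro l r; rfl
  | cons x xs ih => intro l r; simp [List.foldl_cons, ih]

-- One scatter step on map-form state.
theorem pv_step_map (points : List Int) (W m : Int) (c : String) (A M : Int → Int) (hm : 0 ≤ m) :
    pvStep points W ((PySem.List.pyRange 0 W 1).map A, (PySem.List.pyRange 0 W 1).map M) (m, c)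
      = ((PySem.List.pyRange 0 W 1).map (fun i =>
            A i + if i ≤ m ∧ m ≤ i + 7 then pvAdj c (PySem.List.pyGetD points (m - i) 0) else 0),
         (PySem.List.pyRange 0 W 1).map (fun i =>
            M i * if i ≤ m ∧ m ≤ i + 7 then pvWm c else 1)) := by
  by_cases hd : c = "d"
  · subst hd
    rw [pvStep, if_pos (Or.inl rfl), pvInner]
    simp only [String.reduceEq, reduceIte]
    rw [pv_foldl_fst (fun l i => PySem.List.pySetD l i (PySem.List.pyGetD l i 0 + PySem.List.pyGetD points (m - i) 0)),
        pv_fold_set' W (fun i old => old + PySem.List.pyGetD points (m - i) 0) _ _ A (by omega) (by omega)]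
    refine Prod.ext ?_ ?_
    · refine List.map_congr_left (fun i hi => ?_)
      have hiW := (PySem.List.mem_pyRange_one.mp hi)
      by_cases hc : i ≤ m ∧ m ≤ i + 7
      · rw [if_pos (by omega), if_pos hc]; simp [pvAdj]
      · rw [if_neg (by omega), if_neg hc]; ring
    · refine (List.map_congr_left (fun i hi => ?_))
      simp [pvWm]
  · by_cases ht : c = "t"
    · subst ht
      rw [pvStep, if_pos (Or.inr (Or.inl rfl)), pvInner]
      simp only [String.reduceEq, reduceIte]
      rw [pv_foldl_fst (fun l i => PySem.List.pySetD l i (PySem.List.pyGetD l i 0 + 2 * PySem.List.pyGetD points (m - i) 0)),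
          pv_fold_set' W (fun i old => old + 2 * PySem.List.pyGetD points (m - i) 0) _ _ A (by omega) (by omega)]
      refine Prod.ext ?_ ?_
      · refine List.map_congr_left (fun i hi => ?_)
        have hiW := (PySem.List.mem_pyRange_one.mp hi)
        by_cases hc : i ≤ m ∧ m ≤ i + 7
        · rw [if_pos (by omega), if_pos hc]; simp [pvAdj]
        · rw [if_neg (by omega), if_neg hc]; ring
      · refine List.map_congr_left (fun i hi => ?_)
        simp [pvWm]
    · by_cases hD : c = "D"
      · subst hD
        rw [pvStep, if_pos (Or.inr (Or.inr (Or.inl rfl))), pvInner]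
        simp only [String.reduceEq, reduceIte]
        rw [pv_foldl_snd (fun l i => PySem.List.pySetD l i (PySem.List.pyGetD l i 0 * 2)),
            pv_fold_set' W (fun i old => old * 2) _ _ M (by omega) (by omega)]
        refine Prod.ext ?_ ?_
        · refine List.map_congr_left (fun i hi => ?_)
          simp [pvAdj]
        · refine List.map_congr_left (fun i hi => ?_)
          have hiW := (PySem.List.mem_pyRange_one.mp hi)
          by_cases hc : i ≤ m ∧ m ≤ i + 7
          · rw [if_pos (by omega), if_pos hc]; simp [pvWm]
          · rw [if_neg (by omega), if_neg hc]; ring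
      · by_cases hT : c = "T"
        · subst hT
          rw [pvStep, if_pos (Or.inr (Or.inr (Or.inr rfl))), pvInner]
          simp only [String.reduceEq, reduceIte]
          rw [pv_foldl_snd (fun l i => PySem.List.pySetD l i (PySem.List.pyGetD l i 0 * 3)),
              pv_fold_set' W (fun i old => old * 3) _ _ M (by omega) (by omega)]
          refine Prod.ext ?_ ?_
          · refine List.map_congr_left (fun i hi => ?_)
            simp [pvAdj]
          · refine List.map_congr_left (fun i hi => ?_)
            have hiW := (PySem.List.mem_pyRange_one.mp hi)
            by_cases hc : i ≤ m ∧ m ≤ i + 7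
            · rw [if_pos (by omega), if_pos hc]; simp [pvWm]
            · rw [if_neg (by omega), if_neg hc]; ring
        · rw [pvStep, if_neg (by simp [hd, ht, hD, hT])]
          refine Prod.ext ?_ ?_
          · refine (List.map_congr_left (fun i hi => ?_))
            simp [pvAdj, hd, ht]
          · refine (List.map_congr_left (fun i hi => ?_))
            simp [pvWm, hD, hT]

-- The whole scatter loop on map-form state.
theorem pv_loop (points : List Int) (W : Int) :
    ∀ (l : List String) (m : Int) (A M : Int → Int), 0 ≤ m →
    (PySem.List.enumerate l m).foldl (pvStep points W)
        ((PySem.List.pyRange 0 W 1).map A, (PySem.List.pyRange 0 W 1).map M)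
      = ((PySem.List.pyRange 0 W 1).map (fun i => A i + pvCA points l m i),
         (PySem.List.pyRange 0 W 1).map (fun i => M i * pvCM l m i)) := by
  intro l
  induction l with
  | nil =>
    intro m A M hm
    simp only [PySem.List.enumerate_nil, List.foldl_nil, pvCA, pvCM]
    refine Prod.ext ?_ ?_ <;> refine List.map_congr_left (fun i _ => by ring)
  | cons c l ih =>
    intro m A M hm
    rw [PySem.List.enumerate_cons, List.foldl_cons, pv_step_map points W m c A M hm,
        ih (m + 1) _ _ (by omega)]
    refine Prod.ext ?_ ?_ <;> refine List.map_congr_left (fun i _ => ?_) <;>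
      simp only [pvCA, pvCM] <;> ring

-- Sum / product of a single-point indicator over the 8 window offsets.
theorem pv_single_sum (h : Int → Int) (m i : Int) :
    ((List.range 8).map (fun (j : Nat) => if i + (j : Int) = m then h (j : Int) else 0)).sum
      = (if i ≤ m ∧ m ≤ i + 7 then h (m - i) else 0) := by
  by_cases hc : i ≤ m ∧ m ≤ i + 7
  · rw [if_pos hc]
    have : m = i ∨ m = i + 1 ∨ m = i + 2 ∨ m = i + 3 ∨ m = i + 4 ∨ m = i + 5 ∨ m = i + 6 ∨ m = i + 7 := by omega
    rcases this with h1|h1|h1|h1|h1|h1|h1|h1 <;> subst h1 <;> simp [List.range_succ]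
  · rw [if_neg hc]
    have : ∀ j ∈ List.range 8, (if i + ((j : Nat) : Int) = m then h (j : Int) else 0) = 0 := by
      intro j hj
      rw [if_neg]
      have := List.mem_range.mp hj
      omega
    rw [List.map_congr_left this]
    simp

theorem pv_single_prod (v : Int) (m i : Int) :
    ((List.range 8).map (fun (j : Nat) => if i + (j : Int) = m then v else 1)).prod
      = (if i ≤ m ∧ m ≤ i + 7 then v else 1) := by
  by_cases hc : i ≤ m ∧ m ≤ i + 7
  · rw [if_pos hc]
    have : m = i ∨ m = i + 1 ∨ m = i + 2 ∨ m = i + 3 ∨ m = i + 4 ∨ m = i + 5 ∨ m = i + 6 ∨ m = i + 7 := by omega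
    rcases this with h1|h1|h1|h1|h1|h1|h1|h1 <;> subst h1 <;> simp [List.range_succ]
  · rw [if_neg hc]
    have : ∀ j ∈ List.range 8, (if i + ((j : Nat) : Int) = m then v else 1) = 1 := by
      intro j hj
      rw [if_neg]
      have := List.mem_range.mp hj
      omega
    rw [List.map_congr_left this]
    simp

theorem pv_CA_gather (pts : List Int) :
    ∀ (l : List String) (m i : Int), i + 7 < m + l.length →
    pvCA pts l m i = ((List.range 8).map (fun (j : Nat) =>
      if m ≤ i + (j : Int) then pvAdj (l.getD (i + (j : Int) - m).toNat "") (PySem.List.pyGetD pts (j : Int) 0) else 0)).sum := by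
  intro l
  induction l with
  | nil =>
    intro m i hlen
    simp only [List.length_nil, Nat.cast_zero, add_zero] at hlen
    have h0 : ∀ j ∈ List.range 8,
        (if m ≤ i + ((j : Nat) : Int) then pvAdj (([] : List String).getD (i + (j : Int) - m).toNat "") (PySem.List.pyGetD pts (j : Int) 0) else 0) = 0 := by
      intro j hj
      rw [if_neg]
      have := List.mem_range.mp hj
      omega
    rw [List.map_congr_left h0]
    simp [pvCA]
  | cons c l ih =>
    intro m i hlen
    simp only [pvCA]
    rw [ih (m + 1) i (by simp at hlen ⊢; omega)]
    have hsplit : ∀ j ∈ List.range 8,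
        (if m ≤ i + ((j : Nat) : Int) then pvAdj ((c :: l).getD (i + (j : Int) - m).toNat "") (PySem.List.pyGetD pts (j : Int) 0) else 0)
        = (if i + ((j : Nat) : Int) = m then pvAdj c (PySem.List.pyGetD pts (j : Int) 0) else 0)
          + (if m + 1 ≤ i + ((j : Nat) : Int) then pvAdj (l.getD (i + (j : Int) - (m + 1)).toNat "") (PySem.List.pyGetD pts (j : Int) 0) else 0) := by
      intro j hj
      by_cases he : i + ((j : Nat) : Int) = m
      · rw [if_pos (by omega), if_pos he, if_neg (by omega),
            show (i + ((j : Nat) : Int) - m).toNat = 0 by omega]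
        simp
      · by_cases hge : m + 1 ≤ i + ((j : Nat) : Int)
        · rw [if_pos (by omega), if_neg he, if_pos hge]
          obtain ⟨k, hk⟩ : ∃ k, (i + ((j : Nat) : Int) - m).toNat = k + 1 :=
            ⟨(i + ((j : Nat) : Int) - (m + 1)).toNat, by omega⟩
          rw [hk, List.getD_cons_succ, show (i + ((j : Nat) : Int) - (m + 1)).toNat = k by omega]
          ring
        · rw [if_neg (by omega), if_neg he, if_neg hge]; ring
    rw [List.map_congr_left hsplit, PySem.List.sum_map_add_int,
        pv_single_sum (fun x => pvAdj c (PySem.List.pyGetD pts x 0)) m i]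

theorem pv_CM_gather :
    ∀ (l : List String) (m i : Int), i + 7 < m + l.length →
    pvCM l m i = ((List.range 8).map (fun (j : Nat) =>
      if m ≤ i + (j : Int) then pvWm (l.getD (i + (j : Int) - m).toNat "") else 1)).prod := by
  intro l
  induction l with
  | nil =>
    intro m i hlen
    simp only [List.length_nil, Nat.cast_zero, add_zero] at hlen
    have h0 : ∀ j ∈ List.range 8,
        (if m ≤ i + ((j : Nat) : Int) then pvWm (([] : List String).getD (i + (j : Int) - m).toNat "") else 1) = 1 := by
      intro j hj
      rw [if_neg]
      have := List.mem_range.mp hj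
      omega
    rw [List.map_congr_left h0]
    simp [pvCM]
  | cons c l ih =>
    intro m i hlen
    simp only [pvCM]
    rw [ih (m + 1) i (by simp at hlen ⊢; omega)]
    have hsplit : ∀ j ∈ List.range 8,
        (if m ≤ i + ((j : Nat) : Int) then pvWm ((c :: l).getD (i + (j : Int) - m).toNat "") else 1)
        = (if i + ((j : Nat) : Int) = m then pvWm c else 1)
          * (if m + 1 ≤ i + ((j : Nat) : Int) then pvWm (l.getD (i + (j : Int) - (m + 1)).toNat "") else 1) := by
      intro j hj
      by_cases he : i + ((j : Nat) : Int) = m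
      · rw [if_pos (by omega), if_pos he, if_neg (by omega),
            show (i + ((j : Nat) : Int) - m).toNat = 0 by omega]
        simp
      · by_cases hge : m + 1 ≤ i + ((j : Nat) : Int)
        · rw [if_pos (by omega), if_neg he, if_pos hge]
          obtain ⟨k, hk⟩ : ∃ k, (i + ((j : Nat) : Int) - m).toNat = k + 1 :=
            ⟨(i + ((j : Nat) : Int) - (m + 1)).toNat, by omega⟩
          rw [hk, List.getD_cons_succ, show (i + ((j : Nat) : Int) - (m + 1)).toNat = k by omega]
          ring
        · rw [if_neg (by omega), if_neg he, if_neg hge]; ring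
    rw [List.map_congr_left hsplit, List.prod_map_mul, pv_single_prod (pvWm c) m i]

theorem pv_main (board : List String) (points : List Int) :
    calculate_max_scrabble_score board points = calculate_max_scrabble_score_alt board points := by
  unfold calculate_max_scrabble_score calculate_max_scrabble_score_alt
  dsimp only
  rw [show (board.length : Int) - 8 + 1 = (board.length : Int) - 7 from by ring]
  by_cases hW : (board.length : Int) - 7 ≤ 0
  · have hnil : PySem.List.pyRange 0 ((board.length : Int) - 7) 1 = [] :=
      PySem.List.pyRange_one_eq_nil (by omega)
    rw [if_pos hW, hnil, List.foldl_nil]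
  · rw [if_neg hW]
    set W : Int := (board.length : Int) - 7 with hWdef
    have hrep0 : List.replicate W.toNat (0 : Int) = (PySem.List.pyRange 0 W 1).map (fun _ => 0) := by
      rw [List.map_const', PySem.List.length_pyRange_one]
      norm_num
    have hrep1 : List.replicate W.toNat (1 : Int) = (PySem.List.pyRange 0 W 1).map (fun _ => 1) := by
      rw [List.map_const', PySem.List.length_pyRange_one]
      norm_num
    rw [hrep0, hrep1, pv_loop points W board 0 _ _ le_rfl]
    refine PySem.List.foldl_congr_mem _ _ _ _ (fun acc i hi => ?_)
    have hiW := PySem.List.mem_pyRange_one.mp hi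
    rw [pv_get_map W i _ 0 hiW.1 hiW.2, pv_get_map W i _ 0 hiW.1 hiW.2]
    congr 1
    -- window equality at i
    have hlen : i + 7 < (0 : Int) + board.length := by omega
    rw [pv_CA_gather points board 0 i hlen, pv_CM_gather board 0 i hlen]
    have hcell : ∀ (k : Int), 0 ≤ k → k < (board.length : Int) →
        PySem.List.pyGetD board k "" = board.getD k.toNat "" := by
      intro k h0 hl
      rw [PySem.List.pyGetD_eq_getElem board "" h0 (by exact_mod_cast hl),
          List.getD_eq_getElem _ _ (by omega)]
    rw [show PySem.List.pyRange 0 8 1 = [0,1,2,3,4,5,6,7] from by decide]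
    simp only [List.foldl_cons, List.foldl_nil, pv_cell]
    rw [show List.range 8 = [0,1,2,3,4,5,6,7] from by decide]
    simp only [List.map_cons, List.map_nil, List.sum_cons, List.sum_nil, List.prod_cons, List.prod_nil]
    simp only [if_pos (by omega : (0:Int) ≤ i + (0:Nat)), if_pos (by omega : (0:Int) ≤ i + (1:Nat)),
               if_pos (by omega : (0:Int) ≤ i + (2:Nat)), if_pos (by omega : (0:Int) ≤ i + (3:Nat)),
               if_pos (by omega : (0:Int) ≤ i + (4:Nat)), if_pos (by omega : (0:Int) ≤ i + (5:Nat)),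
               if_pos (by omega : (0:Int) ≤ i + (6:Nat)), if_pos (by omega : (0:Int) ≤ i + (7:Nat))]
    push_cast
    simp only [add_zero, sub_zero]
    rw [hcell i (by omega) (by omega), hcell (i+1) (by omega) (by omega), hcell (i+2) (by omega) (by omega),
        hcell (i+3) (by omega) (by omega), hcell (i+4) (by omega) (by omega), hcell (i+5) (by omega) (by omega),
        hcell (i+6) (by omega) (by omega), hcell (i+7) (by omega) (by omega)]
    simp only [pv_lm_adj]
    norm_num
    ring

-- ===== VERDICT (by name: the statement is the Claim_ definition above) =====
theorem calculate_max_scrabble_score_spec : Claim_equal_calculate_max_scrabble_score := by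
  intro board points _ _
  unfold Spec_calculate_max_scrabble_score
  exact pv_main board points
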